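-- pv_equiv track=rewrite | github.com/symaeng98/Algorithm | 프로그래머스/서머_윈터_코딩(~2018)/숫자 게임 (판단력, 그리디, 구현).py | solution
-- ===== SOURCE A (Python) =====
-- from collections import deque
--
-- def solution(A, B):
--     A.sort()
--     B.sort()
--     bq = deque(B)
--     cnt = 0
--     for i in range(len(A)-1, -1, -1):
--         if A[i] >= bq[-1]:
--             bq.popleft()
--         else:
--             bq.pop()
--             cnt += 1
--     return cnt
-- ===== SOURCE B (Python) =====
-- def solution(A, B):
--     # Ascending two-pointer over both sorted lists (sorts in place, like A).
--     A.sort()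
--     B.sort()
--     cnt = i = j = 0
--     while i < len(A) and j < len(B):
--         if B[j] > A[i]:
--             cnt += 1
--             i += 1
--         j += 1
--     return cnt
-- ===== Notes on version B (the rewrite author's own statement) =====
-- stated objective: idiomatic
-- what changed: Replaces the descending walk over A with double-ended pops from a deque of B by the canonical ascending two-pointer over both sorted lists (no deque, no negative indexing), matching smallest winnable B to each A.
-- outside the precondition, e.g. on solution([1], []): A raises IndexError, B returns 0
import Mathlib
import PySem

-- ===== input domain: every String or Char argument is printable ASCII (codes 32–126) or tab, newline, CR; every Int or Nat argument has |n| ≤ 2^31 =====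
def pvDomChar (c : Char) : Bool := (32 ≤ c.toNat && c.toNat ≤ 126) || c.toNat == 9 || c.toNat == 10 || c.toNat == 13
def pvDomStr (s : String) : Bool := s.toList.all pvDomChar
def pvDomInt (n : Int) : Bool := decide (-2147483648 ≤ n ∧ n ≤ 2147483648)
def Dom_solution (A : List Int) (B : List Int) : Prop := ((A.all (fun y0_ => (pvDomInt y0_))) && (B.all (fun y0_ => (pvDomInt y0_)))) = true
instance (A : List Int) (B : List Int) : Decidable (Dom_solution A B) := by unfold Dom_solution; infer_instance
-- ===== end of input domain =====

-- B replaces A's descending deque walk by the ascending two-pointer over both sorted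
-- lists (idiomatic, same cost). Both Pythons sort their arguments in place; the
-- equivalence proved here is about the RETURN value (the mutation is identical anyway).

-- ===== PORT A =====
-- the for-loop over range(len(A)-1, -1, -1): state = (bq, cnt)
def solnFold (As : List Int) (st : List Int × Int) : List Int × Int :=
  (PySem.List.pyRange ((As.length : Int) - 1) (-1) (-1)).foldl (fun st i =>
    match PySem.List.pyGet? As i, PySem.List.pyGet? st.1 (-1) with
    | some a, some b =>
        if b ≤ a then (st.1.tail, st.2)            -- A[i] >= bq[-1]: bq.popleft()
        else (st.1.dropLast, st.2 + 1)             -- bq.pop(); cnt += 1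
    | _, _ => st                                    -- bq empty: Python raises (outside Pre_)
  ) st

def solution (A : List Int) (B : List Int) : Int :=
  let As := PySem.List.sorted A (fun x => x) false
  let Bs := PySem.List.sorted B (fun x => x) false
  (solnFold As (Bs, 0)).2

-- ===== PORT B =====
-- the while loop with pointers i, j rendered as the suffixes of the two sorted lists
def altLoop (As : List Int) (Bs : List Int) : Int :=
  match As, Bs with
  | a :: as, b :: bs => if a < b then 1 + altLoop as bs else altLoop (a :: as) bs
  | _, _ => 0
termination_by structural Bs

def solution_alt (A : List Int) (B : List Int) : Int :=
  altLoop (PySem.List.sorted A (fun x => x) false) (PySem.List.sorted B (fun x => x) false)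

-- ===== PRECONDITION & SPEC =====
-- A raises IndexError (empty deque) exactly when len(B) < len(A); only those inputs are excluded.
def Pre_solution (A : List Int) (B : List Int) : Prop := A.length ≤ B.length
instance (A : List Int) (B : List Int) : Decidable (Pre_solution A B) := by unfold Pre_solution; infer_instance
def pvWitness_solution : List Int × List Int := ([5, 1, 3], [2, 5, 6])

def Spec_solution (A : List Int) (B : List Int) (out : Int) : Prop := out = solution_alt A B
instance (A : List Int) (B : List Int) (out : Int) : Decidable (Spec_solution A B out) := by unfold Spec_solution; infer_instance

-- ===== CLAIM (what is proved, stated in full; the proofs are below) =====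
def Claim_equal_solution : Prop := ∀ (A : List Int) (B : List Int), Dom_solution A B → Pre_solution A B → Spec_solution A B (solution A B)

-- ===== LEMMAS AND PROOFS =====

-- one step of A's loop on the element A[i] (the deque-empty branch keeps the state, as the fold does)
def aStep (st : List Int × Int) (a : Int) : List Int × Int :=
  match PySem.List.pyGet? st.1 (-1) with
  | some b => if b ≤ a then (st.1.tail, st.2) else (st.1.dropLast, st.2 + 1)
  | none => st

lemma altLoop_nil_right (As : List Int) : altLoop As [] = 0 := by
  cases As <;> simp [altLoop]

lemma altLoop_nil_left (Bs : List Int) : altLoop [] Bs = 0 := by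
  cases Bs <;> simp [altLoop]

-- dropping the minimum of Bs does not change the count when Bs still covers As
lemma altLoop_drop_min (as : List Int) : ∀ (b : Int) (bs : List Int),
    (∀ x ∈ bs, b ≤ x) → bs.Pairwise (· ≤ ·) → as.length ≤ bs.length →
    altLoop as (b :: bs) = altLoop as bs := by
  induction as with
  | nil => intro b bs _ _ _; simp [altLoop_nil_left]
  | cons a as ih =>
    intro b bs hb hp hlen
    cases bs with
    | nil => simp at hlen
    | cons b1 bs2 =>
      by_cases hab : a < b
      · have hab1 : a < b1 := lt_of_lt_of_le hab (hb b1 (by simp))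
        simp only [altLoop, if_pos hab, if_pos hab1]
        rw [ih b1 bs2 (List.pairwise_cons.mp hp).1 (List.pairwise_cons.mp hp).2
          (by simpa using Nat.le_of_succ_le_succ hlen)]
      · simp only [altLoop, if_neg hab]

-- the largest element of Bs beats the largest of As: it is matched, count 1 + rest
lemma altLoop_top_win : ∀ (bs' as : List Int) (a b : Int),
    (∀ x ∈ as, x ≤ a) → (∀ x ∈ bs', x ≤ b) → a < b →
    altLoop (as ++ [a]) (bs' ++ [b]) = 1 + altLoop as bs' := by
  intro bs'
  induction bs' with
  | nil =>
    intro as a b ha _ hab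
    cases as with
    | nil => simp [altLoop, hab]
    | cons a1 as2 =>
      have h1 : a1 < b := lt_of_le_of_lt (ha a1 (by simp)) hab
      simp [altLoop, h1, altLoop_nil_right]
  | cons b1 bs2 ih =>
    intro as a b ha hb hab
    cases as with
    | nil =>
      have single : ∀ (bs : List Int), altLoop [a] (bs ++ [b]) = 1 := by
        intro bs
        induction bs with
        | nil => simp [altLoop, hab]
        | cons c cs ihc =>
          by_cases hca : a < c
          · simp [altLoop, hca, altLoop_nil_left]
          · simpa only [List.cons_append, altLoop, if_neg hca] using ihc
      rw [List.nil_append, single (b1 :: bs2)]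
      simp [altLoop_nil_left]
    | cons a1 as2 =>
      by_cases h1 : a1 < b1
      · simp only [List.cons_append, altLoop, if_pos h1]
        rw [ih as2 a b (fun x hx => ha x (by simp [hx])) (fun x hx => hb x (by simp [hx])) hab]
      · simp only [List.cons_append, altLoop, if_neg h1]
        exact ih (a1 :: as2) a b ha (fun x hx => hb x (by simp [hx])) hab

-- an A-element at least as large as every B never wins: appending it changes nothing
lemma altLoop_top_lose : ∀ (bs as : List Int) (a : Int),
    (∀ x ∈ bs, x ≤ a) → altLoop (as ++ [a]) bs = altLoop as bs := by
  intro bs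
  induction bs with
  | nil => intro as a _; simp [altLoop_nil_right]
  | cons b1 bs2 ih =>
    intro as a hb
    cases as with
    | nil =>
      have hna : ¬ a < b1 := not_lt.mpr (hb b1 (by simp))
      simp only [List.nil_append, altLoop, if_neg hna, altLoop_nil_left]
      simpa [altLoop_nil_left] using ih [] a (fun x hx => hb x (by simp [hx]))
    | cons a1 as2 =>
      by_cases h1 : a1 < b1
      · simp only [List.cons_append, altLoop, if_pos h1]
        rw [ih as2 a (fun x hx => hb x (by simp [hx]))]
      · simp only [List.cons_append, altLoop, if_neg h1]
        exact ih (a1 :: as2) a (fun x hx => hb x (by simp [hx]))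

-- the index-range fold of port A is the element fold over As.reverse
lemma solnFold_eq_reverse_foldl (As : List Int) : ∀ (st : List Int × Int),
    solnFold As st = As.reverse.foldl aStep st := by
  induction As using List.reverseRecOn with
  | nil =>
    intro st
    simp [solnFold]
  | append_singleton As a ih =>
    intro st
    have hlen : ((As ++ [a]).length : Int) - 1 = (As.length : Int) := by
      simp
    have hcons : PySem.List.pyRange ((As.length : Int)) (-1) (-1)
        = (As.length : Int) :: PySem.List.pyRange ((As.length : Int) - 1) (-1) (-1) :=
      PySem.List.pyRange_neg_one_cons (by omega)
    have hget : PySem.List.pyGet? (As ++ [a]) ((As.length : Int)) = some a :=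
      PySem.List.pyGet?_append_length As [] a
    have hcongr : ∀ (s : List Int × Int),
        (PySem.List.pyRange ((As.length : Int) - 1) (-1) (-1)).foldl (fun st i =>
          match PySem.List.pyGet? (As ++ [a]) i, PySem.List.pyGet? st.1 (-1) with
          | some a', some b => if b ≤ a' then (st.1.tail, st.2) else (st.1.dropLast, st.2 + 1)
          | _, _ => st) s
        = solnFold As s := by
      intro s
      unfold solnFold
      apply PySem.List.foldl_congr_mem
      intro acc i hi
      have hi' : -1 < i ∧ i ≤ (As.length : Int) - 1 := PySem.List.mem_pyRange_neg_one.mp hi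
      have hidx : PySem.List.pyGet? (As ++ [a]) i = PySem.List.pyGet? As i := by
        rw [PySem.List.pyGet?_of_nonneg _ (by omega), PySem.List.pyGet?_of_nonneg _ (by omega),
          List.getElem?_append_left (by omega)]
      rw [hidx]
    unfold solnFold
    rw [hlen, hcons, List.foldl_cons, hget]
    have hstep : (match some a, PySem.List.pyGet? st.1 (-1) with
        | some a', some b => if b ≤ a' then (st.1.tail, st.2) else (st.1.dropLast, st.2 + 1)
        | _, _ => st) = aStep st a := by
      unfold aStep
      cases PySem.List.pyGet? st.1 (-1) <;> rfl
    rw [hstep, hcongr (aStep st a), ih (aStep st a), List.reverse_append]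
    simp

-- A's loop on sorted lists computes the two-pointer count
lemma main_loop (as : List Int) : ∀ (bs : List Int) (c : Int),
    as.Pairwise (· ≤ ·) → bs.Pairwise (· ≤ ·) → as.length ≤ bs.length →
    (as.reverse.foldl aStep (bs, c)).2 = c + altLoop as bs := by
  induction as using List.reverseRecOn with
  | nil => intro bs c _ _ _; simp [altLoop_nil_left]
  | append_singleton as a ih =>
    intro bs c hpa hpb hlen
    obtain ⟨hpas, -, hmax⟩ := List.pairwise_append.mp hpa
    have hmax' : ∀ x ∈ as, x ≤ a := fun x hx => hmax x hx a (by simp)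
    have hne : bs ≠ [] := by
      intro h; subst h; simp at hlen
    set bL := bs.getLast hne with hbL
    have hsplit : bs.dropLast ++ [bL] = bs := List.dropLast_append_getLast hne
    have hget : PySem.List.pyGet? bs (-1) = some bL := by
      rw [PySem.List.pyGet?_neg_one, List.getLast?_eq_some_getLast hne]
    have hdrop_pw : bs.dropLast.Pairwise (· ≤ ·) :=
      hpb.sublist (List.dropLast_sublist bs)
    have hdrop_le : ∀ x ∈ bs.dropLast, x ≤ bL := by
      have := List.pairwise_append.mp (hsplit ▸ hpb)
      exact fun x hx => this.2.2 x hx bL (by simp)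
    have hall_le : ∀ x ∈ bs, x ≤ bL := by
      intro x hx
      rw [← hsplit] at hx
      rcases List.mem_append.mp hx with h | h
      · exact hdrop_le x h
      · simp at h; omega
    rw [List.reverse_append, List.reverse_singleton, List.singleton_append, List.foldl_cons]
    have hstep : aStep (bs, c) a =
        if bL ≤ a then (bs.tail, c) else (bs.dropLast, c + 1) := by
      unfold aStep; rw [hget]
    by_cases hcase : bL ≤ a
    · rw [hstep, if_pos hcase]
      cases bs with
      | nil => exact absurd rfl hne
      | cons b0 rest =>
        obtain ⟨hhead, hrest⟩ := List.pairwise_cons.mp hpb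
        have hIH := ih rest c hpas hrest (by simp at hlen ⊢; omega)
        simp only [List.tail_cons]
        rw [hIH]
        rw [altLoop_top_lose (b0 :: rest) as a (fun x hx => le_trans (hall_le x hx) hcase)]
        rw [altLoop_drop_min as b0 rest hhead hrest (by simp at hlen ⊢; omega)]
    · rw [hstep, if_neg hcase]
      have hIH := ih bs.dropLast (c + 1) hpas hdrop_pw
        (by rw [List.length_dropLast]; simp at hlen ⊢; omega)
      have h2 : altLoop (as ++ [a]) bs = 1 + altLoop as bs.dropLast := by
        conv_lhs => rw [← hsplit]
        exact altLoop_top_win bs.dropLast as a bL hmax' hdrop_le (by omega)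
      rw [hIH, h2]
      ring

-- ===== VERDICT (by name: the statement is the Claim_ definition above) =====
theorem solution_spec : Claim_equal_solution := by
  intro A B _ hpre
  unfold Spec_solution solution solution_alt
  simp only []
  show (solnFold (PySem.List.sorted A (fun x => x) false) (PySem.List.sorted B (fun x => x) false, 0)).2 = _
  have hpa : (PySem.List.sorted A (fun x => x) false).Pairwise (· ≤ ·) := by
    simpa using PySem.List.sorted_pairwise A (fun x => x)
  have hpb : (PySem.List.sorted B (fun x => x) false).Pairwise (· ≤ ·) := by
    simpa using PySem.List.sorted_pairwise B (fun x => x)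
  have hl : (PySem.List.sorted A (fun x => x) false).length
      ≤ (PySem.List.sorted B (fun x => x) false).length := by
    rw [PySem.List.length_sorted, PySem.List.length_sorted]; exact hpre
  rw [solnFold_eq_reverse_foldl, main_loop _ _ _ hpa hpb hl, zero_add]
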